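-- pv_equiv track=rewrite | github.com/yingbo-ma/Project-Code | Basic Code/emnlp/energy-based-vad.py | calEnergy
-- ===== SOURCE A (Python) =====
-- frameSize = 8000
--
-- def calEnergy(wave_data):
--     energy = []
--     sum = 0
--     for i in range(len(wave_data)) :
--         sum = sum + (int(wave_data[i]) * int(wave_data[i]))
--         if (i + 1) % frameSize == 0 :
--             energy.append(sum)
--             sum = 0
--         elif i == len(wave_data) - 1 :
--             energy.append(sum)
--     return energy
-- ===== SOURCE B (Python) =====
-- frameSize = 8000
--
-- def calEnergy(wave_data):
--     return [sum(int(x) * int(x) for x in wave_data[start:start + frameSize])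
--             for start in range(0, len(wave_data), frameSize)]
-- ===== Notes on version B (the rewrite author's own statement) =====
-- stated objective: simpler
-- what changed: Replaced the flat index loop with a running sum, modulo boundary test and last-element flush by an outer loop over frame starts (range stepping by frameSize) with a per-frame slice whose squared values are summed directly.
import Mathlib
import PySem

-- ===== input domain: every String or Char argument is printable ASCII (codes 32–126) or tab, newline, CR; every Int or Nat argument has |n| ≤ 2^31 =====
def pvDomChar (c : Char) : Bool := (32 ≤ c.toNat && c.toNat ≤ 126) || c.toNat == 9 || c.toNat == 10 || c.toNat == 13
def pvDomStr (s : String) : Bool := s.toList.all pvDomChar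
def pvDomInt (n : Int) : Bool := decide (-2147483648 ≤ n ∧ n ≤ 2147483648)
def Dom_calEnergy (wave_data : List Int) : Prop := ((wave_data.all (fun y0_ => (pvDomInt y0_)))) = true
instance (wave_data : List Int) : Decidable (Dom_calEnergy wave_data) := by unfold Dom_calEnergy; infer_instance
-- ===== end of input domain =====

-- B replaces A's flat index loop (running sum, modulo boundary test, last-element flush) by an
-- outer loop over frame starts stepping by frameSize, summing the squares of each slice (simpler).

-- ===== PORT A =====
def frameSize : Int := 8000

def calEnergy (wave_data : List Int) : List Int :=
  (((PySem.List.pyRange 0 (wave_data.length : Int) 1).foldl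
    (fun (st : List Int × Int) i =>
      let s := st.2 + PySem.List.pyGetD wave_data i 0 * PySem.List.pyGetD wave_data i 0
      if PySem.Int.mod (i + 1) frameSize = 0 then (st.1 ++ [s], 0)
      else if i = (wave_data.length : Int) - 1 then (st.1 ++ [s], s)
      else (st.1, s))
    ([], 0))).1

-- ===== PORT B =====
-- sum(int(x) * int(x) for x in chunk)  (int(x) on an int is x itself)
def sqSum (chunk : List Int) : Int := (chunk.map (fun x => x * x)).sum

def calEnergy_alt (wave_data : List Int) : List Int :=
  (PySem.List.pyRange 0 (wave_data.length : Int) frameSize).map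
    (fun start => sqSum (PySem.List.slice wave_data (some start) (some (start + frameSize))))

-- ===== PRECONDITION & SPEC =====
def Spec_calEnergy (wave_data : List Int) (out : List Int) : Prop := out = calEnergy_alt wave_data
instance (wave_data : List Int) (out : List Int) : Decidable (Spec_calEnergy wave_data out) := by unfold Spec_calEnergy; infer_instance

-- ===== CLAIM (what is proved, stated in full; the proofs are below) =====
def Claim_equal_calEnergy : Prop := ∀ (wave_data : List Int), Dom_calEnergy wave_data → Spec_calEnergy wave_data (calEnergy wave_data)

-- ===== LEMMAS AND PROOFS =====

-- the Nat-indexed body of A's loop (conditions and access moved from Int to Nat)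
def stepG (last : Nat) (g : Nat → Int) (st : List Int × Int) (j : Nat) : List Int × Int :=
  let s := st.2 + g j * g j
  if (j + 1) % 8000 = 0 then (st.1 ++ [s], 0)
  else if j = last then (st.1 ++ [s], s)
  else (st.1, s)

-- common recursive shape both sides are reduced to
def chunkSums (xs : List Int) : List Int :=
  if h : xs = [] then [] else sqSum (xs.take 8000) :: chunkSums (xs.drop 8000)
termination_by xs.length
decreasing_by
  have : 0 < xs.length := List.length_pos_iff.mpr h
  simp only [List.length_drop]; omega

theorem chunkSums_nil : chunkSums [] = [] := by
  rw [chunkSums]; simp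

theorem chunkSums_cons (xs : List Int) (h : xs ≠ []) :
    chunkSums xs = sqSum (xs.take 8000) :: chunkSums (xs.drop 8000) := by
  rw [chunkSums]; simp [h]

-- A's port equals the Nat-indexed loop
theorem A_conv (xs : List Int) :
    calEnergy xs
      = ((List.range xs.length).foldl (stepG (xs.length - 1) (fun j => xs.getD j 0)) ([], 0)).1 := by
  unfold calEnergy
  rw [PySem.List.pyRange_zero_natCast, List.foldl_map]
  congr 1
  apply PySem.List.foldl_congr_mem
  intro acc k hk
  have hk' : k < xs.length := List.mem_range.mp hk
  have h1 : PySem.Int.mod ((k : Int) + 1) frameSize = (((k + 1) % 8000 : Nat) : Int) := by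
    have hc : ((k : Int) + 1) = ((k + 1 : Nat) : Int) := by push_cast; ring
    rw [hc, frameSize]
    exact_mod_cast PySem.Int.mod_natCast (k + 1) 8000
  have h2 : ((((k + 1) % 8000 : Nat) : Int) = 0) ↔ ((k + 1) % 8000 = 0) := by
    exact_mod_cast Iff.rfl
  have h3 : ((k : Int) = (xs.length : Int) - 1) ↔ (k = xs.length - 1) := by omega
  simp only [stepG, PySem.List.pyGetD_natCast, h1]
  rw [if_congr h2 rfl rfl, if_congr h3 rfl rfl]

-- a stretch of the loop that crosses no frame boundary and is not the last index just накапливает the sum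
theorem quietRun (g : Nat → Int) (last : Nat) :
    ∀ (m a : Nat) (acc : List Int) (s : Int),
      (∀ j, a ≤ j → j < a + m → (j + 1) % 8000 ≠ 0 ∧ j ≠ last) →
      (List.range' a m).foldl (stepG last g) (acc, s)
        = (acc, s + ((List.range' a m).map (fun j => g j * g j)).sum) := by
  intro m
  induction m with
  | zero => intro a acc s _; simp
  | succ m ih =>
    intro a acc s h
    have hc := h a (le_refl a) (by omega)
    rw [List.range'_succ, List.foldl_cons]
    have hstep : stepG last g (acc, s) a = (acc, s + g a * g a) := by
      simp [stepG, hc.1, hc.2]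
    rw [hstep, ih (a + 1) _ _ (fun j hj1 hj2 => h j (by omega) (by omega))]
    simp only [List.map_cons, List.sum_cons]
    congr 1
    ring

theorem sum_sq_take (xs : List Int) :
    ∀ m, m ≤ xs.length →
      ((List.range m).map (fun t => xs.getD t 0 * xs.getD t 0)).sum = sqSum (xs.take m) := by
  intro m
  induction m with
  | zero => intro _; simp [sqSum]
  | succ m ih =>
    intro h
    have hm : m < xs.length := by omega
    rw [List.range_succ, List.take_add_one]
    simp only [List.map_append, List.sum_append, sqSum, List.getElem?_eq_getElem hm]
    rw [ih (by omega)]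
    simp [sqSum, List.getD_eq_getElem?_getD, List.getElem?_eq_getElem hm]

-- (drop k xs).getD i = xs.getD (k + i)
theorem getD_drop (xs : List Int) (k i : Nat) :
    (xs.drop k).getD i 0 = xs.getD (k + i) 0 := by
  simp [List.getD_eq_getElem?_getD, List.getElem?_drop]

-- main invariant for A's loop: from a frame-aligned offset it computes the chunk sums
theorem A_main (xs : List Int) :
    ∀ (o : Nat) (acc : List Int), 8000 ∣ o →
      ((List.range' o xs.length).foldl
          (stepG (o + xs.length - 1) (fun j => xs.getD (j - o) 0)) (acc, 0)).1
        = acc ++ chunkSums xs := by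
  induction xs using chunkSums.induct with
  | case1 => intro o acc _; simp [chunkSums_nil]
  | case2 xs hne ih =>
    intro o acc ho
    have hn : 0 < xs.length := List.length_pos_iff.mpr hne
    set n := xs.length with hnn
    set m := min 8000 n with hm
    have hm1 : 1 ≤ m := by omega
    have hsplit : List.range' o n = (List.range' o (m - 1) ++ [o + (m - 1)]) ++ List.range' (o + m) (n - m) := by
      have e1 : List.range' o (m - 1) ++ List.range' (o + (m - 1)) 1 = List.range' o m := by
        have := List.range'_append (s := o) (m := m - 1) (n := 1) (step := 1)
        simp only [one_mul] at this
        rw [this]; congr 1; omega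
      have e2 : List.range' o m ++ List.range' (o + m) (n - m) = List.range' o n := by
        have := List.range'_append (s := o) (m := m) (n := n - m) (step := 1)
        simp only [one_mul] at this
        rw [this]; congr 1; omega
      rw [← e2, ← e1]
      simp [List.range'_one]
    rw [hsplit, List.foldl_append, List.foldl_append]
    simp only [List.foldl_cons, List.foldl_nil]
    rw [quietRun _ _ (m - 1) o acc 0 (by intro j hj1 hj2; constructor <;> omega)]
    set S1 := ((List.range' o (m - 1)).map
        (fun j => xs.getD (j - o) 0 * xs.getD (j - o) 0)).sum with hS1
    have hS1' : S1 = ((List.range (m - 1)).map (fun t => xs.getD t 0 * xs.getD t 0)).sum := by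
      rw [hS1, List.range'_eq_map_range, List.map_map]
      apply congrArg List.sum
      apply List.map_congr_left
      intro t _
      simp
    -- the boundary/last element appends the full chunk sum
    have hfull : 0 + S1 + xs.getD (o + (m - 1) - o) 0 * xs.getD (o + (m - 1) - o) 0
        = sqSum (xs.take m) := by
      rw [hS1', ← sum_sq_take xs m (by omega)]
      have hmm : m - 1 + 1 = m := by omega
      rw [← hmm, List.range_succ]
      simp only [List.map_append, List.sum_append, List.map_cons, List.map_nil,
        List.sum_cons, List.sum_nil, hmm, Nat.add_sub_cancel_left]
      ring
    by_cases hcase : 8000 ≤ n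
    · -- full frame: the modulo condition fires
      have hm8 : m = 8000 := by omega
      have happ : stepG (o + n - 1) (fun j => xs.getD (j - o) 0)
            (acc, 0 + S1) (o + (m - 1))
          = (acc ++ [sqSum (xs.take m)], 0) := by
        have hmod : (o + (m - 1) + 1) % 8000 = 0 := by
          obtain ⟨c, rfl⟩ := ho; omega
        simp only [stepG]
        rw [if_pos hmod, ← hfull]
      rw [happ]
      by_cases hrest : n = 8000
      · -- no further elements
        have : n - m = 0 := by omega
        rw [this]
        simp only [List.range'_zero, List.foldl_nil]
        rw [chunkSums_cons xs hne]
        have hdrop : xs.drop 8000 = [] := by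
          apply List.drop_eq_nil_of_le; omega
        rw [hdrop, chunkSums_nil, hm8]
      · have hlt : 8000 < n := by omega
        have hdl : (xs.drop 8000).length = n - 8000 := by simp [hnn]
        have ih' := ih (o + 8000) (acc ++ [sqSum (xs.take m)]) (dvd_add ho (dvd_refl 8000))
        rw [hdl] at ih'
        have hcong : (List.range' (o + m) (n - m)).foldl
              (stepG (o + n - 1) (fun j => xs.getD (j - o) 0))
              (acc ++ [sqSum (xs.take m)], 0)
            = (List.range' (o + 8000) (n - 8000)).foldl
              (stepG (o + 8000 + (n - 8000) - 1) (fun j => (xs.drop 8000).getD (j - (o + 8000)) 0))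
              (acc ++ [sqSum (xs.take m)], 0) := by
          rw [hm8]
          apply PySem.List.foldl_congr_mem
          intro st j hj
          have hj' : o + 8000 ≤ j ∧ j < o + 8000 + (n - 8000) := List.mem_range'_1.mp hj
          have hlast : o + n - 1 = o + 8000 + (n - 8000) - 1 := by omega
          have hg : xs.getD (j - o) 0 = (xs.drop 8000).getD (j - (o + 8000)) 0 := by
            have he : 8000 + (j - (o + 8000)) = j - o := by omega
            rw [getD_drop, he]
          rw [stepG, stepG, hlast, hg]
        rw [hcong, ih']
        rw [chunkSums_cons xs hne, hm8]
        simp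
    · -- final partial frame: the last-index condition fires
      have hm' : m = n := by omega
      have hmod : (o + (m - 1) + 1) % 8000 ≠ 0 := by
        obtain ⟨c, rfl⟩ := ho; omega
      have hlast : o + (m - 1) = o + n - 1 := by omega
      have happ : stepG (o + n - 1) (fun j => xs.getD (j - o) 0)
            (acc, 0 + S1) (o + (m - 1))
          = (acc ++ [sqSum (xs.take m)], sqSum (xs.take m)) := by
        simp only [stepG]
        rw [if_neg hmod, if_pos hlast, ← hfull]
      rw [happ]
      have : n - m = 0 := by omega
      rw [this]
      simp only [List.range'_zero, List.foldl_nil]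
      rw [chunkSums_cons xs hne]
      have hdrop : xs.drop 8000 = [] := by
        apply List.drop_eq_nil_of_le; omega
      have htake : xs.take m = xs.take 8000 := by
        rw [hm']
        rw [List.take_of_length_le (by omega), List.take_of_length_le (by omega)]
      rw [hdrop, chunkSums_nil, htake]

-- peel the first frame start off range(0, b, 8000)
theorem Bstep (b : Int) (hb : 0 < b) :
    PySem.List.pyRange 0 b 8000
      = 0 :: (PySem.List.pyRange 0 (b - 8000) 8000).map (· + 8000) := by
  rw [PySem.List.pyRange_of_pos 0 b (by norm_num),
      PySem.List.pyRange_of_pos 0 (b - 8000) (by norm_num)]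
  by_cases h : 8000 < b
  · rw [if_pos hb, if_pos (by omega : (0:Int) < b - 8000)]
    have hc : ((b - 0 + 8000 - 1) / 8000).toNat = ((b - 8000 - 0 + 8000 - 1) / 8000).toNat + 1 := by
      omega
    rw [hc, List.range_succ_eq_map, List.map_cons, List.map_map, List.map_map]
    refine List.cons_eq_cons.mpr ⟨by norm_num, ?_⟩
    · apply List.map_congr_left
      intro k _
      simp only [Function.comp_def]
      push_cast
      ring
  · rw [if_pos hb, if_neg (by omega : ¬ (0:Int) < b - 8000)]
    have hc : ((b - 0 + 8000 - 1) / 8000).toNat = 1 := by omega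
    rw [hc]
    simp

-- B's port equals the chunked recursion
theorem B_eq (xs : List Int) : calEnergy_alt xs = chunkSums xs := by
  induction xs using chunkSums.induct with
  | case1 =>
    rw [chunkSums_nil]
    unfold calEnergy_alt
    rw [PySem.List.pyRange_of_pos 0 _ (by rw [frameSize]; norm_num)]
    simp
  | case2 xs hne ih =>
    have hn : 0 < xs.length := List.length_pos_iff.mpr hne
    have hb : (0 : Int) < (xs.length : Int) := by exact_mod_cast hn
    rw [chunkSums_cons xs hne]
    unfold calEnergy_alt
    rw [show frameSize = (8000 : Int) from rfl, Bstep _ hb]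
    rw [List.map_cons]
    congr 1
    · -- head chunk
      rw [show ((0 : Int) + 8000) = ((8000 : Nat) : Int) by norm_num]
      rw [PySem.List.slice_zero_start, PySem.List.slice_to_natCast]
    · -- tail chunks
      rw [List.map_map]
      by_cases hc : 8000 < xs.length
      · have hdl : ((xs.drop 8000).length : Int) = (xs.length : Int) - 8000 := by
          rw [List.length_drop]; omega
        rw [← ih]
        unfold calEnergy_alt
        rw [hdl]
        apply List.map_congr_left
        intro start hstart
        have h0 : (0 : Int) ≤ start := by
          have := (PySem.List.mem_pyRange_iff_of_pos (by norm_num : (0:Int) < 8000) start).mp hstart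
          omega
        obtain ⟨j, rfl⟩ := Int.eq_ofNat_of_zero_le h0
        simp only [Function.comp_def]
        have eL : PySem.List.slice xs (some ((j : Int) + 8000)) (some ((j : Int) + 8000 + 8000))
            = List.take 8000 (List.drop (j + 8000) xs) := by
          have h1 : ((j : Int) + 8000) = (((j + 8000 : Nat)) : Int) := by push_cast; ring
          have h2 : ((j : Int) + 8000 + 8000) = (((j + 8000 : Nat)) : Int) + ((8000 : Nat) : Int) := by
            push_cast; ring
          rw [h2, h1, PySem.List.slice_natCast_add]
        have eR : PySem.List.slice (xs.drop 8000) (some (j : Int)) (some ((j : Int) + frameSize))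
            = List.take 8000 (List.drop j (xs.drop 8000)) := by
          have h1 : ((j : Int)) = (((j : Nat)) : Int) := rfl
          have h2 : ((j : Int) + frameSize) = (((j : Nat)) : Int) + ((8000 : Nat) : Int) := by
            rw [frameSize]; push_cast; ring
          rw [h2, PySem.List.slice_natCast_add]
        rw [eL, eR, List.drop_drop]
        have he : 8000 + j = j + 8000 := by omega
        rw [he]
      · -- the tail is empty on both sides
        have hle : xs.length ≤ 8000 := by omega
        have h1 : PySem.List.pyRange 0 ((xs.length : Int) - 8000) 8000 = [] := by
          rw [PySem.List.pyRange_of_pos 0 _ (by norm_num)]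
          rw [if_neg (by omega : ¬ (0:Int) < (xs.length : Int) - 8000)]
          simp
        have h2 : xs.drop 8000 = [] := List.drop_eq_nil_of_le hle
        rw [h1, h2, chunkSums_nil]
        simp

-- ===== VERDICT (by name: the statement is the Claim_ definition above) =====
theorem calEnergy_spec : Claim_equal_calEnergy := by
  intro xs _
  show calEnergy xs = calEnergy_alt xs
  rw [A_conv, B_eq]
  have h := A_main xs 0 [] ⟨0, rfl⟩
  simpa [List.range_eq_range'] using h
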